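-- pv_equiv track=rewrite | github.com/Gumbito/Preparatorio-OBI-CP2-Tijuca-II | Nível 2/2021/Cifra da Nlogônia/gumbito.py | vogal_mais_proxima
-- ===== SOURCE A (Python) =====
-- alfabeto = 'abcdefghijklmnopqrstuvxz'
--
-- vogais = set('aeiou')
--
-- def vogal_mais_proxima(letra: str) -> str:
--     pos_letra = alfabeto.index(letra)
--     pos_vogal = 0
--
--     # procura a vogal mais próxima à esquerda
--     for pos in reversed(range(pos_letra)):
--         possivel_vogal = alfabeto[pos]
--         if possivel_vogal in vogais:
--             pos_vogal = pos
--             break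
--
--     # distância da letra até a vogal mais próxima à esquerda
--     dist = pos_letra - pos_vogal
--
--     # procura a vogal mais próxima à direita andando menos que antes
--     for pos in range(pos_letra + 1, min(pos_letra + dist, len(alfabeto))):
--         # esse min limita a busca ao fim do alfabeto
--         possivel_vogal = alfabeto[pos]
--         if possivel_vogal in vogais:
--             pos_vogal = pos
--             break
--
--     return alfabeto[pos_vogal]
-- ===== SOURCE B (Python) =====
-- alfabeto = 'abcdefghijklmnopqrstuvxz'
--
-- VOGAL_POS = [0, 4, 8, 14, 20]
--
-- def vogal_mais_proxima(letra: str) -> str: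
--     p = alfabeto.index(letra)
--     left = [v for v in VOGAL_POS if v < p]
--     right = [v for v in VOGAL_POS if v > p]
--     if not left:
--         return alfabeto[0]
--     melhor = left[-1]
--     if right and right[0] - p < p - melhor:
--         melhor = right[0]
--     return alfabeto[melhor]
-- ===== Notes on version B (the rewrite author's own statement) =====
-- stated objective: simpler
-- what changed: Replaces A's two index-by-index scans over the alphabet (leftward with default 0, then a bounded rightward scan) with a precomputed vowel-index table split into positions below/above the letter's index, picking left[-1] unless the first right vowel is strictly closer.
import Mathlib
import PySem

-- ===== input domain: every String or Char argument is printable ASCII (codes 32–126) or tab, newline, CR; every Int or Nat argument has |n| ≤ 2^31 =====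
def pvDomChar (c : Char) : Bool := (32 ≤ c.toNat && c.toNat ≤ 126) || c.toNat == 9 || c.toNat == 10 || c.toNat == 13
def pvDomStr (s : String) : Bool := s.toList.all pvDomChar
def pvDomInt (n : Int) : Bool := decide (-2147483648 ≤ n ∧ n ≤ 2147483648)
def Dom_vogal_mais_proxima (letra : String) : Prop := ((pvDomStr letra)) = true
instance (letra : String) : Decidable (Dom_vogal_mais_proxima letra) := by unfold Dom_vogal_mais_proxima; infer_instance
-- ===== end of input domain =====

-- B replaces A's two index-by-index scans over the alphabet with a precomputed vowel-index
-- table split around the letter's position (simpler; same cost at this fixed size).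

-- ===== PORT A =====
-- alfabeto = 'abcdefghijklmnopqrstuvxz'
def pvAlfabeto : String := "abcdefghijklmnopqrstuvxz"
-- vogais = set('aeiou')
def pvVogais : List Char := ['a', 'e', 'i', 'o', 'u']

-- body of A after pos_letra = alfabeto.index(letra): the two break-loops as find? over the ranges
-- (alfabeto[pos] yields a char; the '.getD'/'.elim' defaults are never reached: all indices stay in 0..23)
def pvBodyA (posLetra : Int) : String :=
  -- for pos in reversed(range(pos_letra)): … break  — first vowel position scanning left, default 0
  let posVogal : Int :=
    match (PySem.List.pyRange (posLetra - 1) (-1) (-1)).find?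
        (fun pos => decide ((PySem.Str.pyGet? pvAlfabeto pos).getD ' ' ∈ pvVogais)) with
    | some pos => pos
    | none => 0
  let dist : Int := posLetra - posVogal
  -- for pos in range(pos_letra + 1, min(pos_letra + dist, len(alfabeto))): … break
  let posVogal : Int :=
    match (PySem.List.pyRange (posLetra + 1) (min (posLetra + dist) 24) 1).find?
        (fun pos => decide ((PySem.Str.pyGet? pvAlfabeto pos).getD ' ' ∈ pvVogais)) with
    | some pos => pos
    | none => posVogal
  (PySem.Str.pyGet? pvAlfabeto posVogal).elim "" (fun c => String.ofList [c])

def vogal_mais_proxima (letra : String) : String :=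
  pvBodyA (PySem.Str.find pvAlfabeto letra)

-- ===== PORT B =====
def pvVogalPos : List Int := [0, 4, 8, 14, 20]

-- body of B after p = alfabeto.index(letra)
def pvBodyB (p : Int) : String :=
  let left := pvVogalPos.filter (fun v => decide (v < p))
  let right := pvVogalPos.filter (fun v => decide (v > p))
  if left = [] then
    (PySem.Str.pyGet? pvAlfabeto 0).elim "" (fun c => String.ofList [c])
  else
    let melhor := PySem.List.pyGetD left (-1) 0
    let melhor :=
      match right with
      | r0 :: _ => if r0 - p < p - melhor then r0 else melhor
      | [] => melhor
    (PySem.Str.pyGet? pvAlfabeto melhor).elim "" (fun c => String.ofList [c])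

def vogal_mais_proxima_alt (letra : String) : String :=
  pvBodyB (PySem.Str.find pvAlfabeto letra)

-- ===== PRECONDITION & SPEC =====
-- Pre_ excludes exactly the inputs where alfabeto.index(letra) raises ValueError:
-- letra must occur as a substring of the alphabet.
def Pre_vogal_mais_proxima (letra : String) : Prop :=
  PySem.Str.isIn letra pvAlfabeto = true
instance (letra : String) : Decidable (Pre_vogal_mais_proxima letra) := by
  unfold Pre_vogal_mais_proxima; infer_instance

def pvWitness_vogal_mais_proxima : String := "c"

def Spec_vogal_mais_proxima (letra : String) (out : String) : Prop := out = vogal_mais_proxima_alt letra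
instance (letra : String) (out : String) : Decidable (Spec_vogal_mais_proxima letra out) := by unfold Spec_vogal_mais_proxima; infer_instance

-- ===== CLAIM (what is proved, stated in full; the proofs are below) =====
def Claim_equal_vogal_mais_proxima : Prop := ∀ (letra : String), Dom_vogal_mais_proxima letra → Pre_vogal_mais_proxima letra → Spec_vogal_mais_proxima letra (vogal_mais_proxima letra)

-- ===== LEMMAS AND PROOFS =====

-- the two bodies agree on every possible index value 0..24
theorem pvBody_eq (n : Nat) (hn : n ≤ 24) : pvBodyA (n : Int) = pvBodyB (n : Int) := by
  interval_cases n <;> decide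

-- ===== VERDICT (by name: the statement is the Claim_ definition above) =====
theorem vogal_mais_proxima_spec : Claim_equal_vogal_mais_proxima := by
  intro letra _ hpre
  unfold Spec_vogal_mais_proxima vogal_mais_proxima vogal_mais_proxima_alt
  have hinf : letra.toList <:+: pvAlfabeto.toList := (PySem.Str.isIn_iff_infix letra pvAlfabeto).mp hpre
  have h0 : 0 ≤ PySem.Str.find pvAlfabeto letra := by
    have := (PySem.Chars.find_nonneg_iff pvAlfabeto.toList letra.toList).mpr hinf
    simpa [PySem.Str.find_eq] using this
  have h24 : PySem.Str.find pvAlfabeto letra ≤ 24 := by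
    have := PySem.Chars.find_le_length pvAlfabeto.toList letra.toList
    simpa [PySem.Str.find_eq, pvAlfabeto] using this
  have hcast : PySem.Str.find pvAlfabeto letra = ((PySem.Str.find pvAlfabeto letra).toNat : Int) :=
    (Int.toNat_of_nonneg h0).symm
  rw [hcast]
  exact pvBody_eq _ (by omega)
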